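-- pv_equiv track=rewrite | github.com/TG-Lim/Algorithm_interview | programmers/모의고사.py | generate_second
-- ===== SOURCE A (Python) =====
-- def generate_second(problem_num):
--     def make_num(i):
--         if i % 2 == 0:
--             return 2
--         elif i % 8 == 1:
--             return 1
--         elif i % 8 == 3:
--             return 3
--         elif i % 8 == 5:
--             return 4
--         elif i % 8 == 7:
--             return 5
--
--     return [make_num(i) for i in range(problem_num)]
-- ===== SOURCE B (Python) =====
-- def generate_second(problem_num):
--     cycle = [2, 1, 2, 3, 2, 4, 2, 5]
--     return (cycle * (problem_num // 8 + 1))[:problem_num]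
-- ===== Notes on version B (the rewrite author's own statement) =====
-- stated objective: simpler
-- what changed: Replaces the per-element modular if/elif chain over range(problem_num) with a precomputed period-8 cycle table tiled by list multiplication and cut to length by a slice.
import Mathlib
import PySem

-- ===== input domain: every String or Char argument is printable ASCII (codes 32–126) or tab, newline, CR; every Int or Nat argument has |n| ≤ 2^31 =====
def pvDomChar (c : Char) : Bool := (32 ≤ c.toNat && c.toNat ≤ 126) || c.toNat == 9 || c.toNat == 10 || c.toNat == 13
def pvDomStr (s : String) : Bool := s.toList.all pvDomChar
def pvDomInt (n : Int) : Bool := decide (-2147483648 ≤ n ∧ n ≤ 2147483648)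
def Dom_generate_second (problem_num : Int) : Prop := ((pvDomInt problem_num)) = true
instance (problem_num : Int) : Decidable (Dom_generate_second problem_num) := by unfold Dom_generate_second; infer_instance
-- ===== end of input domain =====

-- B replaces A's per-element modular if/elif chain with a precomputed period-8 cycle
-- tiled by list multiplication and cut by a slice (objective: simpler).

-- ===== PORT A =====
-- inner helper make_num; the final 0 is Python's implicit None, unreachable: the
-- branches cover every integer (even → 2, odd → i % 8 ∈ {1,3,5,7})
def pvMakeNum (i : Int) : Int :=
  if PySem.Int.mod i 2 = 0 then 2
  else if PySem.Int.mod i 8 = 1 then 1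
  else if PySem.Int.mod i 8 = 3 then 3
  else if PySem.Int.mod i 8 = 5 then 4
  else if PySem.Int.mod i 8 = 7 then 5
  else 0

def generate_second (problem_num : Int) : List Int :=
  (PySem.List.pyRange 0 problem_num 1).map pvMakeNum

-- ===== PORT B =====
def generate_second_alt (problem_num : Int) : List Int :=
  let cycle : List Int := [2, 1, 2, 3, 2, 4, 2, 5]
  PySem.List.slice
    (List.flatten (List.replicate (PySem.Int.floordiv problem_num 8 + 1).toNat cycle))
    none (some problem_num)

-- ===== PRECONDITION & SPEC =====
def Spec_generate_second (problem_num : Int) (out : List Int) : Prop := out = generate_second_alt problem_num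
instance (problem_num : Int) (out : List Int) : Decidable (Spec_generate_second problem_num out) := by unfold Spec_generate_second; infer_instance

-- ===== CLAIM (what is proved, stated in full; the proofs are below) =====
def Claim_equal_generate_second : Prop := ∀ (problem_num : Int), Dom_generate_second problem_num → Spec_generate_second problem_num (generate_second problem_num)

-- ===== LEMMAS AND PROOFS =====

theorem pv_flat_rep_length (cy : List Int) (k : Nat) :
    (List.flatten (List.replicate k cy)).length = k * cy.length := by
  simp [List.length_flatten]

theorem pv_flat_rep_get (cy : List Int) (hcy : cy.length = 8) (k i : Nat)
    (h : i < 8 * k) (h1 : i < (List.flatten (List.replicate k cy)).length)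
    (h2 : i % 8 < cy.length) :
    (List.flatten (List.replicate k cy))[i] = cy[i % 8] := by
  induction k generalizing i with
  | zero => omega
  | succ k ih =>
    simp only [List.replicate_succ, List.flatten_cons]
    by_cases hi : i < 8
    · rw [List.getElem_append_left (by omega)]
      congr 1
      omega
    · rw [List.getElem_append_right (by omega)]
      have hstep := ih (i - 8) (by omega)
        (by rw [pv_flat_rep_length, hcy]; omega) (by omega)
      simp only [show i - cy.length = i - 8 from by omega,
        show (i - 8) % 8 = i % 8 from by omega] at hstep ⊢
      exact hstep

theorem pv_make_num_period (i : Nat) : pvMakeNum (i : Int) = pvMakeNum ((i % 8 : Nat) : Int) := by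
  have e2 : PySem.Int.mod (i : Int) 2 = ((i % 2 : Nat) : Int) := by
    exact_mod_cast PySem.Int.mod_natCast i 2
  have e8 : PySem.Int.mod (i : Int) 8 = ((i % 8 : Nat) : Int) := by
    exact_mod_cast PySem.Int.mod_natCast i 8
  have f2 : PySem.Int.mod ((i % 8 : Nat) : Int) 2 = ((i % 8 % 2 : Nat) : Int) := by
    exact_mod_cast PySem.Int.mod_natCast (i % 8) 2
  have f8 : PySem.Int.mod ((i % 8 : Nat) : Int) 8 = ((i % 8 % 8 : Nat) : Int) := by
    exact_mod_cast PySem.Int.mod_natCast (i % 8) 8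
  unfold pvMakeNum
  rw [e2, e8, f2, f8, Nat.mod_mod_of_dvd i (dvd_refl 8),
    (Nat.mod_mod_of_dvd i (by norm_num : (2:Nat) ∣ 8)).symm]

theorem generate_second_spec : Claim_equal_generate_second := by
  intro n _
  unfold Spec_generate_second generate_second generate_second_alt
  by_cases hn : 0 ≤ n
  · obtain ⟨m, rfl⟩ := Int.eq_ofNat_of_zero_le hn
    rw [PySem.List.pyRange_zero_natCast, PySem.List.slice_to_natCast]
    have hfd : PySem.Int.floordiv (m : Int) 8 = ((m / 8 : Nat) : Int) := by
      exact_mod_cast PySem.Int.floordiv_natCast m 8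
    rw [hfd]
    have hk : (((m / 8 : Nat) : Int) + 1).toNat = m / 8 + 1 := by omega
    rw [hk]
    apply List.ext_getElem
    · simp only [List.length_take, List.length_map, List.length_range,
        pv_flat_rep_length, List.length_cons, List.length_nil]
      omega
    · intro i h1 h2
      have him : i < m := by
        simpa using h1
      simp only [List.getElem_take, List.getElem_map, List.getElem_range]
      rw [pv_flat_rep_get _ (by decide) (m / 8 + 1) i (by omega)
          (by rw [pv_flat_rep_length]; simp; omega) (by simp; omega)]
      have h8 : i % 8 = 0 ∨ i % 8 = 1 ∨ i % 8 = 2 ∨ i % 8 = 3 ∨ i % 8 = 4 ∨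
          i % 8 = 5 ∨ i % 8 = 6 ∨ i % 8 = 7 := by omega
      rcases h8 with h | h | h | h | h | h | h | h <;>
        simp only [pv_make_num_period i, h] <;>
        simp [pvMakeNum, PySem.Int.mod, Int.fmod]
  · -- n < 0: range is empty and the tiling count is nonpositive, so both sides are []
    have hneg : n < 0 := by omega
    have hr : PySem.List.pyRange 0 n 1 = [] := by
      rw [PySem.List.pyRange_one]
      simp
      omega
    have hfd : PySem.Int.floordiv n 8 + 1 ≤ 0 := by
      have := PySem.Int.floordiv_mul_add_mod n 8
      have h1 := PySem.Int.mod_nonneg n (b := 8) (by norm_num)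
      have h2 := PySem.Int.mod_lt n (b := 8) (by norm_num)
      omega
    have : (PySem.Int.floordiv n 8 + 1).toNat = 0 := by omega
    rw [hr, this]
    simp [PySem.List.slice, PySem.List.clampIdx]

-- ===== VERDICT (by name: the statement is the Claim_ definition above) =====
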